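-- pv_equiv track=rewrite | github.com/chang-chih-yao/OCR | OCR/script/inference_core.py | delete_return_line
-- ===== SOURCE A (Python) =====
-- def delete_return_line(my_str, cmd):
--     split_str = my_str.split('\n')
--     target_line_return = 0
--     for i in range(len(split_str)-1, 0, -1):
--         if split_str[i] != '':
--             target_line_return = i
--             break
--     result = ''
--     for i in range(target_line_return+1):    # 0 ~ target_line_return
--         result += split_str[i]
--         result += '\n'
--
--     target_line_cmd = 0
--     for i in range(len(split_str)-1, 0, -1):
--         if split_str[i].find(cmd) >=0:
--             target_line_cmd = i
--             break
--     return result, target_line_cmd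
-- ===== SOURCE B (Python) =====
-- def delete_return_line(my_str, cmd):
--     lines = my_str.split('\n')
--     target_line_return = 0
--     target_line_cmd = 0
--     for i in range(1, len(lines)):
--         if lines[i] != '':
--             target_line_return = i
--         if cmd in lines[i]:
--             target_line_cmd = i
--     return '\n'.join(lines[:target_line_return + 1]) + '\n', target_line_cmd
-- ===== Notes on version B (the rewrite author's own statement) =====
-- stated objective: alternative
-- what changed: Replaces A's two backward break-scans plus a per-line string-concatenation loop by one forward pass that tracks both last-match indices simultaneously, and builds the result with a single '\n'.join over a slice.
import Mathlib
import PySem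

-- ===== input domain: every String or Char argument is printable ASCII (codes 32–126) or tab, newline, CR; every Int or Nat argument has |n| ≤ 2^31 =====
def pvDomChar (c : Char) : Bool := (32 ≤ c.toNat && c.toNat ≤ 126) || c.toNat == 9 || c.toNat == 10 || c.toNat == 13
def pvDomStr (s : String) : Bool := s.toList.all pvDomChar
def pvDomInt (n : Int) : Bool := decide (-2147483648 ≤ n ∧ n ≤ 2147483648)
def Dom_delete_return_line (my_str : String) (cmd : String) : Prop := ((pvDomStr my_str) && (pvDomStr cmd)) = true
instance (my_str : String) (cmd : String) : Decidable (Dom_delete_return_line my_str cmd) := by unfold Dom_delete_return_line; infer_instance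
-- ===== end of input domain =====

-- B replaces A's two backward break-scans and a per-line concatenation loop by one forward pass
-- maintaining both last-match indices, plus a single join over a slice (alternative decomposition).

-- ===== PORT A =====
-- A's 'for i in range(len(split_str)-1, 0, -1): if p(i): target = i; break' with default 0:
-- first index in the given descending index list satisfying p, else 0
def pvBreakScan (p : Int → Prop) [DecidablePred p] : List Int → Int
  | [] => 0
  | i :: rest => if p i then i else pvBreakScan p rest

def delete_return_line (my_str : String) (cmd : String) : String × Int :=
  let split_str := PySem.Chars.splitOn my_str.toList ['\n']
  let target_line_return := pvBreakScan
      (fun i => PySem.List.pyGetD split_str i [] ≠ [])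
      (PySem.List.pyRange ((split_str.length : Int) - 1) 0 (-1))
  let result := (PySem.List.pyRange 0 (target_line_return + 1) 1).foldl
      (fun acc i => acc ++ PySem.List.pyGetD split_str i [] ++ ['\n']) []
  let target_line_cmd := pvBreakScan
      (fun i => 0 ≤ PySem.Chars.find (PySem.List.pyGetD split_str i []) cmd.toList)
      (PySem.List.pyRange ((split_str.length : Int) - 1) 0 (-1))
  (String.ofList result, target_line_cmd)

-- ===== PORT B =====
def delete_return_line_alt (my_str : String) (cmd : String) : String × Int :=
  let lines := PySem.Chars.splitOn my_str.toList ['\n']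
  let st := (PySem.List.pyRange 1 (lines.length : Int) 1).foldl
      (fun (st : Int × Int) i =>
        let l := PySem.List.pyGetD lines i []
        ((if l ≠ [] then i else st.1),
         (if PySem.Chars.isIn cmd.toList l then i else st.2)))
      (0, 0)
  (String.ofList (PySem.Chars.join ['\n'] (PySem.List.slice lines none (some (st.1 + 1))) ++ ['\n']),
   st.2)

-- ===== PRECONDITION & SPEC =====
def Spec_delete_return_line (my_str : String) (cmd : String) (out : String × Int) : Prop := out = delete_return_line_alt my_str cmd
instance (my_str : String) (cmd : String) (out : String × Int) : Decidable (Spec_delete_return_line my_str cmd out) := by unfold Spec_delete_return_line; infer_instance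

-- ===== CLAIM (what is proved, stated in full; the proofs are below) =====
def Claim_equal_delete_return_line : Prop := ∀ (my_str : String) (cmd : String), Dom_delete_return_line my_str cmd → Spec_delete_return_line my_str cmd (delete_return_line my_str cmd)

-- ===== LEMMAS AND PROOFS =====

-- B's pair fold splits into two independent folds
theorem pvFoldPair (p q : Int → Prop) [DecidablePred p] [DecidablePred q]
    (l : List Int) (a b : Int) :
    l.foldl (fun (st : Int × Int) i => ((if p i then i else st.1), (if q i then i else st.2))) (a, b)
      = (l.foldl (fun acc i => if p i then i else acc) a,
         l.foldl (fun acc i => if q i then i else acc) b) := by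
  induction l generalizing a b with
  | nil => rfl
  | cons x xs ih => simp only [List.foldl]; rw [ih]

-- the break-scan only looks at the truth of its predicate
theorem pvBreakScanCongr (p q : Int → Prop) [DecidablePred p] [DecidablePred q]
    (h : ∀ i, p i ↔ q i) (l : List Int) : pvBreakScan p l = pvBreakScan q l := by
  induction l with
  | nil => rfl
  | cons x xs ih =>
    simp only [pvBreakScan, ih]
    by_cases hp : p x
    · rw [if_pos hp, if_pos ((h x).mp hp)]
    · rw [if_neg hp, if_neg (fun hq => hp ((h x).mpr hq))]

-- A's descending break-scan = B's forward last-match fold, on the ranges both programs use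
theorem pvScanEq (p : Int → Prop) [DecidablePred p] (n : Nat) :
    pvBreakScan p (PySem.List.pyRange ((n : Int) - 1) 0 (-1))
      = (PySem.List.pyRange 1 (n : Int) 1).foldl (fun acc i => if p i then i else acc) 0 := by
  induction n with
  | zero => simp [PySem.List.pyRange_neg_one_eq_nil, PySem.List.pyRange_one_eq_nil, pvBreakScan]
  | succ m ih =>
    rcases Nat.eq_zero_or_pos m with hm | hm
    · subst hm
      simp [PySem.List.pyRange_neg_one_eq_nil, PySem.List.pyRange_one_eq_nil, pvBreakScan]
    · have h1 : ((m : Int) + 1) - 1 = (m : Int) := by ring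
      have hcons : PySem.List.pyRange (m : Int) 0 (-1)
          = (m : Int) :: PySem.List.pyRange ((m : Int) - 1) 0 (-1) :=
        PySem.List.pyRange_neg_one_cons (by exact_mod_cast hm)
      have hsucc : PySem.List.pyRange 1 ((m : Int) + 1) 1
          = PySem.List.pyRange 1 (m : Int) 1 ++ [(m : Int)] :=
        PySem.List.pyRange_one_succ_right (by exact_mod_cast hm)
      push_cast
      rw [h1, hcons, hsucc, List.foldl_append]
      simp only [pvBreakScan, List.foldl]
      by_cases hp : p (m : Int)
      · simp [hp]
      · simp [hp, ih]

-- the forward last-match fold yields its init or a member of the list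
theorem pvFoldMem (p : Int → Prop) [DecidablePred p] (l : List Int) (init : Int) :
    l.foldl (fun acc i => if p i then i else acc) init = init ∨
      l.foldl (fun acc i => if p i then i else acc) init ∈ l := by
  induction l generalizing init with
  | nil => exact Or.inl rfl
  | cons x xs ih =>
    simp only [List.foldl]
    rcases ih (if p x then x else init) with h | h
    · rw [h]
      by_cases hp : p x <;> simp [hp]
    · exact Or.inr (List.mem_cons_of_mem _ h)

-- join over xs ++ [a] for nonempty xs
theorem pvJoinAppend (sep a : List Char) (xs : List (List Char)) (h : xs ≠ []) :
    PySem.Chars.join sep (xs ++ [a]) = PySem.Chars.join sep xs ++ sep ++ a := by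
  induction xs with
  | nil => exact absurd rfl h
  | cons x ys ih =>
    cases ys with
    | nil => simp [PySem.Chars.join_cons_cons, PySem.Chars.join_singleton]
    | cons y zs =>
      have h1 : (x :: y :: zs) ++ [a] = x :: ((y :: zs) ++ [a]) := by simp
      have h2 : PySem.Chars.join sep (x :: ((y :: zs) ++ [a]))
          = x ++ sep ++ PySem.Chars.join sep ((y :: zs) ++ [a]) :=
        PySem.Chars.join_cons_cons sep x y (zs ++ [a])
      rw [h1, h2, ih (by simp), PySem.Chars.join_cons_cons]
      simp [List.append_assoc]

-- A's concatenation loop over range(t+1) = join of the first t+1 lines plus a trailing newline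
theorem pvConcatEq (ls : List (List Char)) (t : Nat) (ht : t = 0 ∨ t < ls.length) :
    (PySem.List.pyRange 0 ((t : Int) + 1) 1).foldl
        (fun acc i => acc ++ PySem.List.pyGetD ls i [] ++ ['\n']) []
      = PySem.Chars.join ['\n'] (ls.take (t + 1)) ++ ['\n'] := by
  induction t with
  | zero =>
    rw [PySem.List.pyRange_one_cons (by norm_num), PySem.List.pyRange_one_eq_nil (by norm_num)]
    cases ls with
    | nil => simp [PySem.Chars.join_nil, PySem.List.pyGetD, PySem.List.pyGet?]
    | cons x xs => simp [PySem.Chars.join_singleton, PySem.List.pyGetD_zero_cons]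
  | succ m ih =>
    have hm : m + 1 < ls.length := by omega
    have hsucc : PySem.List.pyRange 0 ((m : Int) + 1 + 1) 1
        = PySem.List.pyRange 0 ((m : Int) + 1) 1 ++ [(m : Int) + 1] :=
      PySem.List.pyRange_one_succ_right (by omega)
    push_cast
    rw [hsucc, List.foldl_append, ih (Or.inr (by omega))]
    have hget : PySem.List.pyGetD ls ((m : Int) + 1) [] = ls[m + 1] := by
      have hc : ((m : Int) + 1) = ((m + 1 : Nat) : Int) := by push_cast; ring
      rw [hc, PySem.List.pyGetD_natCast]
      exact List.getD_eq_getElem ls [] hm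
    have htake : ls.take (m + 1 + 1) = ls.take (m + 1) ++ [ls[m + 1]] := by
      rw [List.take_add_one]
      simp [List.getElem?_eq_getElem hm]
    rw [htake, pvJoinAppend _ _ _ (by
      intro hnil
      rcases List.take_eq_nil_iff.mp hnil with h | h
      · omega
      · rw [h] at hm; simp at hm)]
    simp [List.foldl, hget, List.append_assoc]

-- the two cmd-predicates agree: split_str[i].find(cmd) >= 0  ↔  cmd in split_str[i]
theorem pvPredIff (cmd l : List Char) :
    (0 ≤ PySem.Chars.find l cmd) ↔ (PySem.Chars.isIn cmd l = true) := by
  rw [PySem.Chars.find_nonneg_iff, PySem.Chars.isIn_iff_infix]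

-- ===== VERDICT (by name: the statement is the Claim_ definition above) =====
theorem delete_return_line_spec : Claim_equal_delete_return_line := by
  intro my_str cmd _
  unfold Spec_delete_return_line
  simp only [delete_return_line, delete_return_line_alt]
  set ls := PySem.Chars.splitOn my_str.toList ['\n'] with hls
  rw [pvFoldPair (fun i => PySem.List.pyGetD ls i [] ≠ [])
        (fun i => PySem.Chars.isIn cmd.toList (PySem.List.pyGetD ls i []) = true),
      pvBreakScanCongr (fun i => 0 ≤ PySem.Chars.find (PySem.List.pyGetD ls i []) cmd.toList)
        (fun i => PySem.Chars.isIn cmd.toList (PySem.List.pyGetD ls i []) = true)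
        (fun i => pvPredIff cmd.toList (PySem.List.pyGetD ls i [])),
      pvScanEq (fun i => PySem.List.pyGetD ls i [] ≠ []) ls.length,
      pvScanEq (fun i => PySem.Chars.isIn cmd.toList (PySem.List.pyGetD ls i []) = true) ls.length]
  set tr := (PySem.List.pyRange 1 (ls.length : Int) 1).foldl
      (fun acc i => if PySem.List.pyGetD ls i [] ≠ [] then i else acc) 0 with htr
  have hbound : tr = 0 ∨ (1 ≤ tr ∧ tr < (ls.length : Int)) := by
    rcases pvFoldMem (fun i => PySem.List.pyGetD ls i [] ≠ [])
        (PySem.List.pyRange 1 (ls.length : Int) 1) 0 with h | h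
    · exact Or.inl h
    · exact Or.inr ((PySem.List.mem_pyRange_one).mp h)
  have h0 : 0 ≤ tr := by rcases hbound with h | h <;> omega
  have hslice : PySem.List.slice ls none (some (tr + 1)) = ls.take (tr.toNat + 1) := by
    rw [show tr + 1 = ((tr.toNat + 1 : Nat) : Int) by omega, PySem.List.slice_to_natCast]
  rw [hslice]
  refine Prod.ext ?_ rfl
  simp only
  congr 1
  rw [show tr = ((tr.toNat : Nat) : Int) by omega]
  refine pvConcatEq ls tr.toNat ?_
  rcases hbound with h | h
  · left; omega
  · right; omega
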